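-- pv_equiv track=rewrite | github.com/SivaKarthik711/Python_250_Neetcode_Leetcode | 3450-maximum-students-on-a-single-bench/3450-maximum-students-on-a-single-bench.py | maxStudentsOnBench
-- ===== SOURCE A (Python) =====
-- def maxStudentsOnBench(students):
--     """
--     :type students: List[List[int]]
--     :rtype: int
--     """
--
--     bench_dict = {}
--
--     # Populate the bench_dict with student data
--     for student_id, bench_id in students:
--         if bench_id not in bench_dict:
--             bench_dict[bench_id] = set()  # Initialize set if bench_id not exists
--         bench_dict[bench_id].add(student_id)
--
--     # Check if the dictionary is empty
--     if not bench_dict: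
--         return 0  # Return 0 if there are no students or benches
--
--     # Find the maximum number of unique students on any bench
--     max_students = max(len(bench) for bench in bench_dict.values())
--
--     return max_students
-- ===== SOURCE B (Python) =====
-- def maxStudentsOnBench(students):
--     benches = []
--     for _, b in students:
--         if b not in benches:
--             benches.append(b)
--     best = 0
--     for b in benches:
--         ids = []
--         for s, bb in students:
--             if bb == b and s not in ids:
--                 ids.append(s)
--         best = max(best, len(ids))
--     return best
-- ===== Notes on version B (the rewrite author's own statement) =====
-- stated objective: alternative
-- what changed: Replaces A's single pass that groups students into a dict of per-bench sets with two staged list passes and no dict or set at all: first collect the distinct bench ids in order, then for each bench rescan the whole input counting its distinct students via list membership.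
import Mathlib
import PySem

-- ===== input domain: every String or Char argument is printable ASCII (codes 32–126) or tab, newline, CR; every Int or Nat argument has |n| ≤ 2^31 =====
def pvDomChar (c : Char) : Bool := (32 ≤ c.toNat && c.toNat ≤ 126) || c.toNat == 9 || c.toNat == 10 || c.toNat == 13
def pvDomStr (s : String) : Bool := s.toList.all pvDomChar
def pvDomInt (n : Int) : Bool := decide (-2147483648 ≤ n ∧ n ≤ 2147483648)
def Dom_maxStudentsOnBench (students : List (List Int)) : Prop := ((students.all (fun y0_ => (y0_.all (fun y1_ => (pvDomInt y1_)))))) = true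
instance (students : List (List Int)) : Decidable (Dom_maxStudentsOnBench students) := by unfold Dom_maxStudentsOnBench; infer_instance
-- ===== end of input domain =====

-- B replaces A's dict-of-per-bench-sets grouping pass with two staged list passes and no
-- dict/set: dedup the bench ids in order, then rescan the input per bench counting its
-- distinct students by list membership (alternative decomposition, not faster).

-- ===== PORT A =====
-- loop body of A: unpack [student_id, bench_id]; initialize the bench's set if absent; add the student
def stepBench (d : PySem.Dict Int (PySem.Set Int)) (st : List Int) :
    PySem.Dict Int (PySem.Set Int) :=
  match st with
  | [studentId, benchId] =>
      let d1 := if d.contains benchId then d else d.insert benchId PySem.Set.empty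
      d1.insert benchId (PySem.Set.add (d1.getD benchId PySem.Set.empty) studentId)
  | _ => d

def maxStudentsOnBench (students : List (List Int)) : Int :=
  let benchDict := students.foldl stepBench (PySem.Dict.mk [])
  if benchDict.items = [] then 0
  else
    match PySem.List.max? (benchDict.values.map (fun b => PySem.Set.len b)) (fun x => x) with
    | some m => m
    | none => 0

-- ===== PORT B =====
-- first loop of B: collect the distinct bench ids in first-occurrence order
def stepBenches (acc : List Int) (st : List Int) : List Int :=
  match st with
  | [_, benchId] => if acc.contains benchId then acc else acc ++ [benchId]
  | _ => acc

-- inner loop of B: collect the distinct student ids seen on bench b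
def stepIds (b : Int) (acc : List Int) (st : List Int) : List Int :=
  match st with
  | [studentId, benchId] =>
      if benchId == b && !acc.contains studentId then acc ++ [studentId] else acc
  | _ => acc

def maxStudentsOnBench_alt (students : List (List Int)) : Int :=
  let benches := students.foldl stepBenches []
  benches.foldl
    (fun best b => max best ((students.foldl (stepIds b) []).length : Int)) 0

-- ===== PRECONDITION & SPEC =====
-- Python unpacking 'student_id, bench_id = st' raises ValueError unless the inner list has length 2.
def Pre_maxStudentsOnBench (students : List (List Int)) : Prop :=
  ∀ st ∈ students, st.length = 2
instance (students : List (List Int)) : Decidable (Pre_maxStudentsOnBench students) := by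
  unfold Pre_maxStudentsOnBench; infer_instance

def pvWitness_maxStudentsOnBench : List (List Int) := [[1, 2], [3, 2], [1, 2], [4, 5]]

def Spec_maxStudentsOnBench (students : List (List Int)) (out : Int) : Prop :=
  out = maxStudentsOnBench_alt students
instance (students : List (List Int)) (out : Int) : Decidable (Spec_maxStudentsOnBench students out) := by
  unfold Spec_maxStudentsOnBench; infer_instance

-- ===== CLAIM =====
def Claim_equal_maxStudentsOnBench : Prop :=
  ∀ (students : List (List Int)), Dom_maxStudentsOnBench students →
    Pre_maxStudentsOnBench students →
    Spec_maxStudentsOnBench students (maxStudentsOnBench students)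

-- ===== LEMMAS AND PROOFS =====

-- Dict.contains agrees with list membership on the keys list
lemma contains_keys (d : PySem.Dict Int (PySem.Set Int)) (b : Int) :
    d.contains b = d.keys.contains b := by
  by_cases h : b ∈ d.keys
  · simp [List.contains_eq_mem, h, (PySem.Dict.contains_iff_mem_keys d b).mpr h]
  · have : d.contains b ≠ true := fun hc => h ((PySem.Dict.contains_iff_mem_keys d b).mp hc)
    simp [List.contains_eq_mem, h, Bool.eq_false_iff.mpr this]

-- one step of A's fold, observed through keys / nodup-keys / getD
lemma stepBench_keys (d : PySem.Dict Int (PySem.Set Int)) (s b : Int) :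
    (stepBench d [s, b]).keys = stepBenches d.keys [s, b] := by
  simp only [stepBench, stepBenches]
  by_cases hc : d.contains b = true
  · rw [if_pos hc]
    rw [PySem.Dict.keys_insert_of_contains _ _ hc]
    rw [← contains_keys, hc]
    simp
  · have hcf : d.contains b = false := Bool.eq_false_iff.mpr hc
    rw [if_neg hc]
    rw [PySem.Dict.keys_insert_of_contains _ _ (PySem.Dict.contains_insert_self _ _ _)]
    rw [PySem.Dict.keys_insert_of_not_contains _ _ hcf]
    rw [← contains_keys, hcf]
    simp

lemma stepBench_nodup (d : PySem.Dict Int (PySem.Set Int)) (s b : Int)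
    (h : d.keys.Nodup) : (stepBench d [s, b]).keys.Nodup := by
  simp only [stepBench]
  by_cases hc : d.contains b = true
  · rw [if_pos hc]; exact PySem.Dict.nodup_keys_insert _ _ _ h
  · rw [if_neg hc]
    exact PySem.Dict.nodup_keys_insert _ _ _ (PySem.Dict.nodup_keys_insert _ _ _ h)

lemma stepBench_getD (d : PySem.Dict Int (PySem.Set Int)) (s b b' : Int) :
    (stepBench d [s, b]).getD b' PySem.Set.empty
      = stepIds b' (d.getD b' PySem.Set.empty) [s, b] := by
  simp only [stepBench, stepIds]
  by_cases hc : d.contains b = true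
  · rw [if_pos hc, PySem.Dict.getD_insert]
    by_cases hb : b' = b
    · subst hb
      simp only [beq_self_eq_true, Bool.true_and, PySem.Set.add_eq_ite]
      by_cases hm : s ∈ d.getD b' PySem.Set.empty
      · simp [List.contains_eq_mem]
      · simp [List.contains_eq_mem]
    · have : (b == b') = false := by simpa using Ne.symm hb
      simp [hb, this]
  · have hcf : d.contains b = false := Bool.eq_false_iff.mpr hc
    rw [if_neg hc, PySem.Dict.getD_insert, PySem.Dict.getD_insert]
    by_cases hb : b' = b
    · subst hb
      have h0 : d.getD b' ([] : PySem.Set Int) = [] :=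
        PySem.Dict.getD_of_not_contains _ _ hcf
      rw [PySem.Dict.getD_insert_self]
      simp [h0]
    · have hbeq : (b == b') = false := by simpa using Ne.symm hb
      simp [PySem.Dict.getD_insert, hb, hbeq]

-- the fold invariant: A's dict, observed through keys and per-bench lookups, is B's two folds
lemma fold_inv (students : List (List Int)) (hlen : ∀ st ∈ students, st.length = 2) :
    ∀ d : PySem.Dict Int (PySem.Set Int), d.keys.Nodup →
      (students.foldl stepBench d).keys = students.foldl stepBenches d.keys
      ∧ (students.foldl stepBench d).keys.Nodup
      ∧ ∀ b, (students.foldl stepBench d).getD b PySem.Set.empty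
          = students.foldl (stepIds b) (d.getD b PySem.Set.empty) := by
  induction students with
  | nil => intro d hnd; exact ⟨rfl, hnd, fun _ => rfl⟩
  | cons st rest ih =>
      intro d hnd
      obtain ⟨s, b, rfl⟩ : ∃ a b : Int, st = [a, b] := by
        have := hlen st (List.mem_cons_self ..)
        match st, this with
        | [a, b], _ => exact ⟨a, b, rfl⟩
      have hlen' : ∀ st ∈ rest, st.length = 2 :=
        fun st hst => hlen st (List.mem_cons_of_mem _ hst)
      obtain ⟨g1, g2, g3⟩ := ih hlen' (stepBench d [s, b]) (stepBench_nodup d s b hnd)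
      refine ⟨?_, g2, ?_⟩
      · simpa [stepBench_keys d s b] using g1
      · intro b'
        have h3 := g3 b'
        rw [stepBench_getD] at h3
        simpa using h3

-- ===== VERDICT =====
theorem maxStudentsOnBench_spec : Claim_equal_maxStudentsOnBench := by
  intro students _ hpre
  unfold Spec_maxStudentsOnBench maxStudentsOnBench maxStudentsOnBench_alt
  obtain ⟨hk, hnd, hg⟩ :=
    fold_inv students hpre (PySem.Dict.mk []) (by exact List.nodup_nil)
  set dF := students.foldl stepBench (PySem.Dict.mk []) with hdF
  have hkeys0 : (PySem.Dict.mk ([] : List (Int × PySem.Set Int))).keys = [] := rfl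
  have hget0 : ∀ b : Int,
      (PySem.Dict.mk ([] : List (Int × PySem.Set Int))).getD b PySem.Set.empty = [] :=
    fun _ => rfl
  rw [hkeys0] at hk
  -- the per-bench counts agree
  have hmap : dF.values.map (fun v => PySem.Set.len v)
      = dF.keys.map (fun b => ((students.foldl (stepIds b) []).length : Int)) := by
    rw [PySem.Dict.values_eq_map_keys dF hnd PySem.Set.empty, List.map_map]
    refine List.map_congr_left (fun b _ => ?_)
    have h1 := hg b
    rw [hget0 b] at h1
    have h2 : dF.getD b ([] : PySem.Set Int) = List.foldl (stepIds b) [] students := h1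
    simp [Function.comp, h2, PySem.Set.len]
  rw [← hk]
  cases hK : dF.keys with
  | nil =>
      have hitems : dF.items = [] := by
        have : dF.items.map Prod.fst = [] := hK
        exact List.map_eq_nil_iff.mp this
      simp [hitems]
  | cons k t =>
      have hitems : dF.items ≠ [] := by
        intro h
        rw [show dF.keys = dF.items.map Prod.fst from rfl, h] at hK
        cases hK
      rw [if_neg hitems, hmap, hK]
      simp only [List.map_cons, List.foldl_cons]
      rw [PySem.List.max?_id_cons]
      have hB : t.foldl
            (fun best b => max best ((students.foldl (stepIds b) []).length : Int))
            (max 0 ((students.foldl (stepIds k) []).length : Int))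
          = (t.map (fun b => ((students.foldl (stepIds b) []).length : Int))).foldl max
            (max 0 ((students.foldl (stepIds k) []).length : Int)) := by
        rw [List.foldl_map]
      rw [hB, max_eq_right (Int.natCast_nonneg _)]
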